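-- pv_equiv track=rewrite | github.com/Projet-UNESP-X-ESIEA/SmartEnergy | mainRFR.py | toDicByFactor
-- ===== SOURCE A (Python) =====
-- def toDicByFactor(pred, facteur):
--     """
--     fonction renvoyant un dictionnaire de type {X:[,]}. cette fonction va classer par facteur les predictions. Chaque element index I
--     dans le tableau pred appartient à la classe indiqué à la position I du tableau facteur. Ainsi on va regroupé toute les données de
--     même classe dans un dictionnaire repertoriant chaque classe ainsi que les valeurs de cette classe.
--
--     :param pred: tableau à classifier
--     :param facteur: correspondance de classe des elements du tableau pred
--     :return: dictionnaire classifier contenant tout les elements differents du tableau facteur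
--     """
--     if len(pred) != len(facteur):
--         raise Exception("les tableaux ne sont pas de même logueur")
--     else:
--         res = {}
--         for i in range(len(pred)):
--             if facteur[i] not in res.keys():
--                 res[facteur[i]] = [pred[i], ]
--             else:
--                 res[facteur[i]].append(pred[i])
--         res2 = dict(sorted(res.items(), key=lambda t: t[0]))
--     return res2
-- ===== SOURCE B (Python) =====
-- def toDicByFactor(pred, facteur):
--     if len(pred) != len(facteur):
--         raise Exception("les tableaux ne sont pas de même logueur")
--     # selection loop: repeatedly peel off the smallest remaining factor with its group
--     pairs = list(zip(facteur, pred))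
--     out = []
--     while pairs:
--         m = min(f for f, _ in pairs)
--         out.append((m, [p for f, p in pairs if f == m]))
--         pairs = [(f, p) for f, p in pairs if f != m]
--     return dict(out)
-- ===== Notes on version B (the rewrite author's own statement) =====
-- stated objective: alternative
-- what changed: B uses no hash grouping and no sort call: a selection loop repeatedly peels off the minimum remaining factor together with its whole group of predictions from the (factor, pred) pair list, emitting the groups directly in ascending key order; A builds a dict with per-element membership insert-or-append and then sorts the finished items.
import Mathlib
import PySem

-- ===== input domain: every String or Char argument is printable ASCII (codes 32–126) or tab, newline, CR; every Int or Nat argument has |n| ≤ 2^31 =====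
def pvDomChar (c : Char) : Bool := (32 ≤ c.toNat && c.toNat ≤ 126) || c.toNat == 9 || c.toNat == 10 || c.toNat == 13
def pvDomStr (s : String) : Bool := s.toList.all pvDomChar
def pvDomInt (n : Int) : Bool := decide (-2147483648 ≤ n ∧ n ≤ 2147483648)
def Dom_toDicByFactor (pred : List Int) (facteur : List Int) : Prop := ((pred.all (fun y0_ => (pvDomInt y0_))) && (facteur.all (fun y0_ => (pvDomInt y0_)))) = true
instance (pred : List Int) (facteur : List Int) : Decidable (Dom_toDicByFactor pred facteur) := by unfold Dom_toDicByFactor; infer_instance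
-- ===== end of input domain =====

-- B replaces A's membership-tested dict-building loop plus final sort by a selection loop
-- that repeatedly extracts the minimum remaining factor with its whole group, emitting the
-- groups directly in ascending key order (objective: alternative).


-- ===== PORT A =====
-- faithful transliteration of A: length check (A raises on mismatch — excluded by Pre_),
-- index loop building a dict by membership test + insert-or-append, then dict(sorted(items)).
def toDicByFactor (pred : List Int) (facteur : List Int) : List (Int × List Int) :=
  if PySem.List.len pred ≠ PySem.List.len facteur then []  -- Python raises here; outside Pre_
  else
    let res : PySem.Dict Int (List Int) :=
      (PySem.List.pyRange 0 (PySem.List.len pred)).foldl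
        (fun res i =>
          if res.contains (PySem.List.pyGetD facteur i 0) = false then
            res.insert (PySem.List.pyGetD facteur i 0) [PySem.List.pyGetD pred i 0]
          else
            res.modify (PySem.List.pyGetD facteur i 0) []
              (fun l => l ++ [PySem.List.pyGetD pred i 0]))
        PySem.Dict.empty
    let res2 : PySem.Dict Int (List Int) :=
      PySem.Dict.ofList (PySem.List.sorted res.items (fun t => t.1))
    res2.items

-- ===== PORT B =====
-- transliteration of Source B's selection loop: while pairs: m = min of factors; append
-- (m, preds with factor m) to out; pairs = pairs with factor ≠ m.  Ported as the
-- tail recursion the while loop is, with 'out' the accumulator.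
-- (min over a nonempty generator is PySem.List.min?; the .getD 0 default is never used.)
def pvExtract (pairs : List (Int × Int)) (out : List (Int × List Int)) : List (Int × List Int) :=
  if h : pairs = [] then out
  else
    let m := (PySem.List.min? (pairs.map (fun fp => fp.1)) (fun f => f)).getD 0
    let group := (pairs.filter (fun fp => fp.1 == m)).map (fun fp => fp.2)
    pvExtract (pairs.filter (fun fp => fp.1 != m)) (out ++ [(m, group)])
termination_by pairs.length
decreasing_by
  obtain ⟨m, hm⟩ : ∃ m, PySem.List.min? (pairs.map (fun fp => fp.1)) (fun f => f) = some m := by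
    cases hmin : PySem.List.min? (pairs.map (fun fp => fp.1)) (fun f => f) with
    | none => exact absurd (List.map_eq_nil_iff.1 ((PySem.List.min?_eq_none_iff _ _).1 hmin)) h
    | some m => exact ⟨m, rfl⟩
  obtain ⟨fp, hfp, hfst⟩ := List.mem_map.1 (PySem.List.min?_mem hm)
  have hmap : pairs.attach.map (fun x => x.val.1) = pairs.map (fun fp => fp.1) :=
    List.attach_map_val
  simp only [List.length_unattach]
  rw [hmap, ← List.length_attach (l := pairs)]
  refine List.length_filter_lt_length_iff_exists.2 ⟨⟨fp, hfp⟩, List.mem_attach _ _, ?_⟩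
  simp [hm, hfst]

-- transliteration of Source B: length check, then dict(extract(list(zip(facteur, pred)))).
def toDicByFactor_alt (pred : List Int) (facteur : List Int) : List (Int × List Int) :=
  if PySem.List.len pred ≠ PySem.List.len facteur then []  -- Python raises here; outside Pre_
  else (PySem.Dict.ofList (pvExtract (facteur.zip pred) [])).items

-- ===== PRECONDITION & SPEC =====
-- Pre_ excludes exactly the inputs where A raises its length-mismatch Exception.
def Pre_toDicByFactor (pred : List Int) (facteur : List Int) : Prop :=
  pred.length = facteur.length
instance (pred : List Int) (facteur : List Int) : Decidable (Pre_toDicByFactor pred facteur) := by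
  unfold Pre_toDicByFactor; infer_instance

def pvWitness_toDicByFactor : List Int × List Int := ([5, 7, 9], [1, 0, 1])

def Spec_toDicByFactor (pred : List Int) (facteur : List Int) (out : List (Int × List Int)) : Prop := out = toDicByFactor_alt pred facteur
instance (pred : List Int) (facteur : List Int) (out : List (Int × List Int)) : Decidable (Spec_toDicByFactor pred facteur out) := by unfold Spec_toDicByFactor; infer_instance

-- ===== CLAIM (what is proved, stated in full; the proofs are below) =====
def Claim_equal_toDicByFactor : Prop := ∀ (pred : List Int) (facteur : List Int), Dom_toDicByFactor pred facteur → Pre_toDicByFactor pred facteur → Spec_toDicByFactor pred facteur (toDicByFactor pred facteur)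

-- ===== LEMMAS AND PROOFS =====

-- the common normal form both ports are reduced to: sorted distinct factors,
-- each paired with the predictions of that factor in original order
def pvTarget (pred facteur : List Int) : List (Int × List Int) :=
  (PySem.List.sorted (PySem.Set.ofList facteur) (fun f => f)).map
    (fun f => (f, ((facteur.zip pred).filter (fun gp => gp.1 == f)).map (fun gp => gp.2)))

-- A's two branches coincide: on a missing key, insert k [p] is modify k [] (· ++ [p]).
theorem pvStep_eq (d : PySem.Dict Int (List Int)) (k : Int) (p : Int) :
    (if d.contains k = false then d.insert k [p] else d.modify k [] (fun l => l ++ [p]))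
      = d.modify k [] (fun l => l ++ [p]) := by
  by_cases h : d.contains k = false
  · simp [h, PySem.Dict.modify, PySem.Dict.getD_of_not_contains]
  · simp [h]

-- A's index loop equals the fold of the modify-step over zip(facteur, pred).
theorem pvLoop_eq (pred facteur : List Int) (h : pred.length = facteur.length) :
    (PySem.List.pyRange 0 (PySem.List.len pred)).foldl
        (fun res i =>
          if res.contains (PySem.List.pyGetD facteur i 0) = false then
            res.insert (PySem.List.pyGetD facteur i 0) [PySem.List.pyGetD pred i 0]
          else
            res.modify (PySem.List.pyGetD facteur i 0) []
              (fun l => l ++ [PySem.List.pyGetD pred i 0]))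
        PySem.Dict.empty
      = (facteur.zip pred).foldl
          (fun d gp => d.modify gp.1 [] (fun l => l ++ [gp.2])) PySem.Dict.empty := by
  have hlen : (facteur.zip pred).length = pred.length := by
    simp [List.length_zip, h]
  have hcongr :
      (PySem.List.pyRange 0 (PySem.List.len pred)).foldl
        (fun res i =>
          if res.contains (PySem.List.pyGetD facteur i 0) = false then
            res.insert (PySem.List.pyGetD facteur i 0) [PySem.List.pyGetD pred i 0]
          else
            res.modify (PySem.List.pyGetD facteur i 0) []
              (fun l => l ++ [PySem.List.pyGetD pred i 0]))
        PySem.Dict.empty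
      = (PySem.List.pyRange 0 (PySem.List.len (facteur.zip pred))).foldl
          (fun d i => d.modify (PySem.List.pyGetD (facteur.zip pred) i (0, 0)).1 []
              (fun l => l ++ [(PySem.List.pyGetD (facteur.zip pred) i (0, 0)).2]))
          PySem.Dict.empty := by
    have hlen' : PySem.List.len pred = PySem.List.len (facteur.zip pred) := by
      simp [PySem.List.len, hlen]
    rw [hlen']
    refine PySem.List.foldl_congr_mem _ _ _ _ ?_
    intro acc i hi
    rcases PySem.List.mem_pyRange_one.1 hi with ⟨h0, h1⟩
    have hiz : i < ((facteur.zip pred).length : Int) := by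
      simpa [PySem.List.len] using h1
    have hif : i < (facteur.length : Int) := by omega
    have hip : i < (pred.length : Int) := by omega
    have hzg : PySem.List.pyGetD (facteur.zip pred) i (0, 0)
        = (facteur.zip pred)[i.toNat]'(by omega) := PySem.List.pyGetD_eq_getElem _ _ h0 hiz
    have hfg : PySem.List.pyGetD facteur i 0 = facteur[i.toNat]'(by omega) :=
      PySem.List.pyGetD_eq_getElem _ _ h0 hif
    have hpg : PySem.List.pyGetD pred i 0 = pred[i.toNat]'(by omega) :=
      PySem.List.pyGetD_eq_getElem _ _ h0 hip
    rw [pvStep_eq, hzg, hfg, hpg, List.getElem_zip]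
  rw [hcongr]
  simpa using PySem.List.foldl_pyRange_pyGetD (facteur.zip pred) (0, 0)
    (fun d gp => d.modify gp.1 [] (fun l => l ++ [gp.2])) PySem.Dict.empty (le_refl 0)

-- dict() of an association list with distinct keys has exactly that list as items
theorem pvItems_ofList {ν : Type} (L : List (Int × ν))
    (hnd : (L.map (fun p => p.1)).Nodup) : (PySem.Dict.ofList L).items = L := by
  have hfresh := PySem.Dict.items_foldl_insert_fresh
    (l := L) (k := fun q : Int × ν => q.1) (v := fun q : Int × ν => q.2)
    (d := (PySem.Dict.empty : PySem.Dict Int ν))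
    (by intro a _; simp) hnd
  unfold PySem.Dict.ofList PySem.Dict.update
  exact hfresh.trans (by simp [PySem.Dict.empty])

-- A reduces to the normal form
theorem pvA_eq (pred facteur : List Int) (hpre : pred.length = facteur.length) :
    toDicByFactor pred facteur = pvTarget pred facteur := by
  unfold toDicByFactor pvTarget
  have hlen : PySem.List.len pred = PySem.List.len facteur := by
    simp [PySem.List.len, hpre]
  rw [if_neg (by simpa using hlen)]
  rw [pvLoop_eq pred facteur hpre]
  set D := (facteur.zip pred).foldl
      (fun d gp => d.modify gp.1 [] (fun l => l ++ [gp.2])) PySem.Dict.empty with hD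
  have hkeys : D.keys = PySem.Set.ofList facteur := by
    rw [hD, PySem.Dict.keys_foldl_modify_key (facteur.zip pred) (fun gp => gp.1) []
      (fun _ gp => fun l => l ++ [gp.2]) PySem.Dict.empty]
    have : (facteur.zip pred).map (fun gp => gp.1) = facteur := by
      simpa using List.map_fst_zip (l₁ := facteur) (l₂ := pred) (by omega)
    rw [this, PySem.Dict.keys_empty, PySem.Set.update_nil_left]
  have hnodup : D.keys.Nodup := by
    rw [hD]
    exact PySem.Dict.nodup_keys_foldl_modify_key _ _ _ _ _ (by simp)
  have hgetD : ∀ k : Int, D.getD k []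
      = ((facteur.zip pred).filter (fun gp => gp.1 == k)).map (fun gp => gp.2) := by
    intro k
    rw [hD, PySem.Dict.getD_foldl_modify_append (facteur.zip pred) PySem.Dict.empty k]
    simp [PySem.Dict.getD_empty]
  have hitems : D.items = D.keys.map (fun k => (k, D.getD k [])) :=
    PySem.Dict.items_eq_map_keys D hnodup []
  show (PySem.Dict.ofList (PySem.List.sorted D.items (fun t => t.1))).items
      = (PySem.List.sorted (PySem.Set.ofList facteur) (fun f => f)).map
          (fun f => (f, ((facteur.zip pred).filter (fun gp => gp.1 == f)).map (fun gp => gp.2)))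
  have hsortedkeys := PySem.List.sorted_ofList_pairwise_lt (κ := Int) facteur
  have hsorted : PySem.List.sorted D.items (fun t => t.1)
      = (PySem.List.sorted (PySem.Set.ofList facteur) (fun f => f)).map
          (fun k => (k, D.getD k [])) := by
    refine PySem.List.sorted_eq_of_perm_of_pairwise_lt _ _ _ ?_ ?_
    · rw [hitems, ← hkeys]
      exact (PySem.List.sorted_perm D.keys (fun f => f) false).map _
    · rw [List.pairwise_map]
      exact hsortedkeys
  rw [hsorted]
  have hfst : ((PySem.List.sorted (PySem.Set.ofList facteur) (fun f => f)).map
        (fun k => (k, D.getD k []))).map (fun p => p.1)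
      = PySem.List.sorted (PySem.Set.ofList facteur) (fun f => f) := by
    simp [List.map_map, Function.comp_def]
  have hnd : (((PySem.List.sorted (PySem.Set.ofList facteur) (fun f => f)).map
        (fun k => (k, D.getD k []))).map (fun p => p.1)).Nodup := by
    rw [hfst]
    exact hsortedkeys.imp ne_of_lt
  rw [pvItems_ofList _ hnd]
  exact List.map_congr_left (fun k _ => by rw [hgetD k])

-- extracting the minimum splits sorted(set(ks)) into min :: sorted(set(rest))
theorem pvSorted_min_cons (ks : List Int) (m : Int)
    (hm : PySem.List.min? ks (fun f => f) = some m) :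
    PySem.List.sorted (PySem.Set.ofList ks) (fun f => f)
      = m :: PySem.List.sorted (PySem.Set.ofList (ks.filter (fun f => f != m))) (fun f => f) := by
  have hmem : m ∈ ks := PySem.List.min?_mem hm
  have hmin : ∀ y ∈ ks, m ≤ y := by
    intro y hy; exact PySem.List.min?_isMin hm y hy
  have hndrest : (PySem.List.sorted (PySem.Set.ofList (ks.filter (fun f => f != m)))
      (fun f => f)).Nodup :=
    (PySem.List.sorted_ofList_pairwise_lt _).imp ne_of_lt
  have hmemrest : ∀ x, x ∈ PySem.List.sorted (PySem.Set.ofList (ks.filter (fun f => f != m)))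
      (fun f => f) ↔ (x ∈ ks ∧ x ≠ m) := by
    intro x
    rw [PySem.List.mem_sorted, PySem.Set.mem_ofList, List.mem_filter]
    simp
  refine PySem.List.sorted_eq_of_perm_of_pairwise_lt _ _ _ ?_ ?_
  · -- permutation with Set.ofList ks
    refine (List.perm_ext_iff_of_nodup ?_ (PySem.Set.nodup_ofList ks)).2 ?_
    · refine List.Nodup.cons ?_ hndrest
      intro hmm
      exact ((hmemrest m).1 hmm).2 rfl
    · intro a
      rw [List.mem_cons, hmemrest a, PySem.Set.mem_ofList]
      constructor
      · rintro (rfl | ⟨ha, _⟩) <;> [exact hmem; exact ha]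
      · intro ha
        by_cases hae : a = m
        · exact Or.inl hae
        · exact Or.inr ⟨ha, hae⟩
  · -- strictly increasing
    refine List.pairwise_cons.2 ⟨?_, ?_⟩
    · intro b hb
      obtain ⟨hbk, hbm⟩ := (hmemrest b).1 hb
      exact lt_of_le_of_ne (hmin b hbk) (Ne.symm hbm)
    · exact PySem.List.sorted_ofList_pairwise_lt _

-- B's selection loop computes the accumulator followed by the sorted grouped normal form
theorem pvExtract_eq (pairs : List (Int × Int)) (out : List (Int × List Int)) :
    pvExtract pairs out
      = out ++ (PySem.List.sorted (PySem.Set.ofList (pairs.map (fun fp => fp.1))) (fun f => f)).map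
          (fun f => (f, (pairs.filter (fun fp => fp.1 == f)).map (fun fp => fp.2))) := by
  induction hN : pairs.length using Nat.strong_induction_on generalizing pairs out with
  | _ N ih =>
  by_cases h : pairs = []
  · subst h; rw [pvExtract.eq_def]; simp [PySem.List.sorted, PySem.Set.ofList]
  · obtain ⟨m, hm⟩ : ∃ m, PySem.List.min? (pairs.map (fun fp => fp.1)) (fun f => f) = some m := by
      cases hmin : PySem.List.min? (pairs.map (fun fp => fp.1)) (fun f => f) with
      | none => exact absurd (List.map_eq_nil_iff.1 ((PySem.List.min?_eq_none_iff _ _).1 hmin)) h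
      | some m => exact ⟨m, rfl⟩
    rw [pvExtract.eq_def, dif_neg h]
    simp only [hm, Option.getD_some]
    set rest := pairs.filter (fun fp => fp.1 != m) with hrest
    have hrestlen : rest.length < pairs.length := by
      obtain ⟨fp, hfp, hfst⟩ := List.mem_map.1 (PySem.List.min?_mem hm)
      refine List.length_filter_lt_length_iff_exists.2 ⟨fp, hfp, ?_⟩
      simp [hfst]
    have hrec := ih rest.length (hN ▸ hrestlen) rest
      (out ++ [(m, (pairs.filter (fun fp => fp.1 == m)).map (fun fp => fp.2))]) rfl
    have hmaprest : rest.map (fun fp => fp.1)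
        = (pairs.map (fun fp => fp.1)).filter (fun f => f != m) := by
      rw [hrest, List.filter_map]
      rfl
    rw [hrec, hmaprest, pvSorted_min_cons _ m hm, List.append_assoc]
    refine congrArg (out ++ ·) ?_
    rw [List.map_cons, List.singleton_append]
    refine List.cons_eq_cons.2 ⟨rfl, ?_⟩
    refine List.map_congr_left ?_
    intro f hf
    have hfm : f ≠ m := by
      have hfmem := (PySem.List.mem_sorted _ _ _ _).1 hf
      have := (PySem.Set.mem_ofList _ _).1 hfmem
      have := List.mem_filter.1 this
      simpa using this.2
    have hff : rest.filter (fun fp => fp.1 == f) = pairs.filter (fun fp => fp.1 == f) := by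
      rw [hrest, List.filter_filter]
      refine List.filter_congr ?_
      intro x _
      by_cases hx : x.1 = f
      · simp [hx, hfm]
      · simp [hx]
    rw [hff]

-- B reduces to the normal form
theorem pvB_eq (pred facteur : List Int) (hpre : pred.length = facteur.length) :
    toDicByFactor_alt pred facteur = pvTarget pred facteur := by
  unfold toDicByFactor_alt pvTarget
  have hlen : PySem.List.len pred = PySem.List.len facteur := by
    simp [PySem.List.len, hpre]
  rw [if_neg (by simpa using hlen)]
  have hmap : (facteur.zip pred).map (fun fp => fp.1) = facteur := by
    simpa using List.map_fst_zip (l₁ := facteur) (l₂ := pred) (by omega)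
  rw [pvExtract_eq, hmap, List.nil_append]
  have hnd : (((PySem.List.sorted (PySem.Set.ofList facteur) (fun f => f)).map
      (fun f => (f, ((facteur.zip pred).filter (fun fp => fp.1 == f)).map (fun fp => fp.2)))).map
        (fun p => p.1)).Nodup := by
    rw [List.map_map]
    simpa [Function.comp_def] using
      (PySem.List.sorted_ofList_pairwise_lt (κ := Int) facteur).imp ne_of_lt
  rw [pvItems_ofList _ hnd]

-- ===== VERDICT (by name: the statement is the Claim_ definition above) =====
theorem toDicByFactor_spec : Claim_equal_toDicByFactor := by
  intro pred facteur _ hpre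
  unfold Pre_toDicByFactor at hpre
  unfold Spec_toDicByFactor
  rw [pvA_eq pred facteur hpre, pvB_eq pred facteur hpre]
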